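-- pv_equiv track=rewrite | github.com/Ivor-Vice-Bulaja/crate-project | backend/importer/acoustid.py | _select_best_release
-- ===== SOURCE A (Python) =====
-- def _select_best_release(releases: list) -> dict | None:
--     """
--     Pick a single release from the recording's release list for label/catalogue lookup.
--
--     Priority order:
--     1. Official releases with a date — earliest by lexicographic date string.
--     2. Official releases without a date — first one.
--     3. Any release with a date — earliest.
--     4. Any release — first.
--     5. Empty list — None.
--     """
--     if not releases:
--         return None
--
--     official_with_date = [r for r in releases if r.get("status") == "Official" and r.get("date")]
--     if official_with_date:
--         return min(official_with_date, key=lambda r: r["date"])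
--
--     official_no_date = [r for r in releases if r.get("status") == "Official"]
--     if official_no_date:
--         return official_no_date[0]
--
--     with_date = [r for r in releases if r.get("date")]
--     if with_date:
--         return min(with_date, key=lambda r: r["date"])
--
--     return releases[0]
-- ===== SOURCE B (Python) =====
-- def _select_best_release(releases: list) -> dict | None:
--     """Single pass: keep the first release whose (tier, date) priority key is
--     lexicographically least, instead of building four filtered lists."""
--     best = None
--     best_key = None
--     for r in releases:
--         if r.get("status") == "Official":
--             key = (0, r["date"]) if r.get("date") else (1, "")
--         else:
--             key = (2, r["date"]) if r.get("date") else (3, "")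
--         if best is None or key < best_key:
--             best = r
--             best_key = key
--     return best
-- ===== Notes on version B (the rewrite author's own statement) =====
-- stated objective: alternative
-- what changed: Replaced A's four list-comprehension passes plus per-tier min/first-element selection by a single loop that keeps the first release with the lexicographically least (tier, date) priority key.
import Mathlib
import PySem

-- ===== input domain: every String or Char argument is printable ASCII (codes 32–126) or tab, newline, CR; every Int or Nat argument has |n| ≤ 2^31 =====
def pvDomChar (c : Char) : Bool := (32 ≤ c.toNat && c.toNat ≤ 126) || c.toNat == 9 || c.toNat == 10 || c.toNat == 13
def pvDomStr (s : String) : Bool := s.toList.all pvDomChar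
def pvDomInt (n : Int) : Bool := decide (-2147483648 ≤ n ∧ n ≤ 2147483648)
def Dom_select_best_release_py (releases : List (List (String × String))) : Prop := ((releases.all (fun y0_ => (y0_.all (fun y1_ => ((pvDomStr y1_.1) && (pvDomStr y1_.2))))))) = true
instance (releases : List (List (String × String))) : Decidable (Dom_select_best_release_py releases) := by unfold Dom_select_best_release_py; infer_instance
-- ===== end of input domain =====

-- B replaces A's four filtered passes by one pass keeping the first release with
-- the lexicographically least (tier, date) priority key; same return value everywhere.

-- Shared transliterations of the dict primitives both Pythons use:
-- r.get(k) on a str->str dict (association list, first match)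
def pvGet (r : List (String × String)) (k : String) : Option String := List.lookup k r
-- r.get("status") == "Official"
def pvOfficial (r : List (String × String)) : Bool := pvGet r "status" == some "Official"
-- r["date"] (only used where the date is present; missing reads as "")
def pvDate (r : List (String × String)) : String := (pvGet r "date").getD ""
-- truthiness of r.get("date"): present and non-empty
def pvHasDate (r : List (String × String)) : Bool := pvDate r != ""

-- ===== PORT A =====
def select_best_release_py (releases : List (List (String × String))) : Option (List (String × String)) :=
  match releases with
  | [] => none                                   -- if not releases: return None
  | _ :: _ =>
    match releases.filter (fun r => pvOfficial r && pvHasDate r) with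
    | owd@(_ :: _) => PySem.List.min? owd pvDate -- min(official_with_date, key=…["date"])
    | [] =>
      match releases.filter (fun r => pvOfficial r) with
      | r :: _ => some r                         -- official_no_date[0]
      | [] =>
        match releases.filter (fun r => pvHasDate r) with
        | wd@(_ :: _) => PySem.List.min? wd pvDate
        | [] => releases.head?                   -- releases[0] (nonempty here)

-- ===== PORT B =====
-- priority key of one release: (tier, date-within-tier)
def pvRank (r : List (String × String)) : Nat × String :=
  if pvOfficial r then (if pvHasDate r then (0, pvDate r) else (1, ""))
  else (if pvHasDate r then (2, pvDate r) else (3, ""))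

-- Python's lexicographic '<' on the (int, str) key pairs
def pvKeyLt (a b : Nat × String) : Bool := a.1 < b.1 || (a.1 == b.1 && a.2 < b.2)

def select_best_release_py_alt (releases : List (List (String × String))) : Option (List (String × String)) :=
  (releases.foldl
    (fun acc r =>
      match acc with
      | none => some (r, pvRank r)
      | some (b, kb) => if pvKeyLt (pvRank r) kb then some (r, pvRank r) else some (b, kb))
    none).map Prod.fst

-- ===== PRECONDITION & SPEC =====
def Spec_select_best_release_py (releases : List (List (String × String))) (out : Option (List (String × String))) : Prop := out = select_best_release_py_alt releases
instance (releases : List (List (String × String))) (out : Option (List (String × String))) : Decidable (Spec_select_best_release_py releases out) := by unfold Spec_select_best_release_py; infer_instance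

-- ===== CLAIM (what is proved, stated in full; the proofs are below) =====
def Claim_equal_select_best_release_py : Prop := ∀ (releases : List (List (String × String))), Dom_select_best_release_py releases → Spec_select_best_release_py releases (select_best_release_py releases)

-- ===== LEMMAS AND PROOFS =====

-- the step B's loop performs on the carried best element
def pvPick (b x : List (String × String)) : List (String × String) :=
  if pvKeyLt (pvRank x) (pvRank b) then x else b

theorem pvB_fold (l : List (List (String × String))) :
    ∀ b, l.foldl
      (fun acc r =>
        match acc with
        | none => some (r, pvRank r)
        | some (b, kb) => if pvKeyLt (pvRank r) kb then some (r, pvRank r) else some (b, kb))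
      (some (b, pvRank b)) = some (l.foldl pvPick b, pvRank (l.foldl pvPick b)) := by
  induction l with
  | nil => intro b; rfl
  | cons x t ih =>
      intro b
      simp only [List.foldl_cons]
      rw [show (pvPick b x) = (if pvKeyLt (pvRank x) (pvRank b) then x else b) from rfl]
      by_cases h : pvKeyLt (pvRank x) (pvRank b) = true
      · simp [h, ih]
      · simp [Bool.of_not_eq_true h, ih]

theorem pvB_cons (x : List (String × String)) (l : List (List (String × String))) :
    select_best_release_py_alt (x :: l) = some (l.foldl pvPick x) := by
  simp [select_best_release_py_alt, pvB_fold]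

-- base: A on a singleton returns its element
theorem pvA_single (b : List (String × String)) :
    select_best_release_py [b] = some b := by
  cases hob : pvOfficial b <;> cases hdb : pvHasDate b <;>
    simp [select_best_release_py, hob, hdb, PySem.List.min?]

-- swap: A's cascade is unchanged when the first two elements are replaced by the
-- one B's loop keeps
theorem pvA_swap (b x : List (String × String)) (l : List (List (String × String))) :
    select_best_release_py (b :: x :: l) = select_best_release_py (pvPick b x :: l) := by
  cases hob : pvOfficial b <;> cases hdb : pvHasDate b <;>
    cases hox : pvOfficial x <;> cases hdx : pvHasDate x <;>
    simp only [pvPick, pvRank, pvKeyLt, hob, hdb, hox, hdx, if_true] <;>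
    · cases h0 : l.filter (fun r => pvOfficial r && pvHasDate r) <;>
      cases h1 : l.filter (fun r => pvOfficial r) <;>
      cases h2 : l.filter (fun r => pvHasDate r) <;>
      simp [select_best_release_py, List.filter_cons, hob, hdb, hox, hdx, h0, h1, h2,
        PySem.List.min?] <;> split_ifs <;> simp_all

theorem pvA_eq_fold (l : List (List (String × String))) :
    ∀ x, select_best_release_py (x :: l) = some (l.foldl pvPick x) := by
  induction l with
  | nil => intro x; exact pvA_single x
  | cons y t ih =>
      intro x
      rw [pvA_swap x y t, ih (pvPick x y)]
      rfl

-- ===== VERDICT (by name: the statement is the Claim_ definition above) =====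
theorem select_best_release_py_spec : Claim_equal_select_best_release_py := by
  intro releases _
  unfold Spec_select_best_release_py
  cases releases with
  | nil => rfl
  | cons x l => rw [pvA_eq_fold l x, pvB_cons x l]
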